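-- pv_equiv track=rewrite | github.com/tberhanu/all_trainings | revision_1_to_7/33**_min_flip.py | minimun_flip
-- ===== SOURCE A (Python) =====
-- def minimun_flip(string):
--
--     arr = []
--     for center in range(len(string)):
--         lefty = string[:center]
--         righty = string[center+1:]
--         lefty_ones = lefty.count("1")
--         righty_zeroes = righty.count("0")
--         arr.append(lefty_ones + righty_zeroes)
--     return min(arr)
-- ===== SOURCE B (Python) =====
-- def minimun_flip(string):
--     # One pass: keep ones seen so far and zeros still to the right of the cursor.
--     zeros_right = string.count("0")
--     ones_left = 0
--     best = None
--     for ch in string: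
--         if ch == "0":
--             zeros_right -= 1
--         v = ones_left + zeros_right
--         if best is None or v < best:
--             best = v
--         if ch == "1":
--             ones_left += 1
--     return best
-- ===== Notes on version B (the rewrite author's own statement) =====
-- stated objective: faster
-- what changed: Replaced the per-center slicing-and-counting (a full count of two slices for every index, then min of the built list) by a single left-to-right pass maintaining a running count of ones seen and zeros remaining, taking the minimum on the fly.
import Mathlib
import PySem

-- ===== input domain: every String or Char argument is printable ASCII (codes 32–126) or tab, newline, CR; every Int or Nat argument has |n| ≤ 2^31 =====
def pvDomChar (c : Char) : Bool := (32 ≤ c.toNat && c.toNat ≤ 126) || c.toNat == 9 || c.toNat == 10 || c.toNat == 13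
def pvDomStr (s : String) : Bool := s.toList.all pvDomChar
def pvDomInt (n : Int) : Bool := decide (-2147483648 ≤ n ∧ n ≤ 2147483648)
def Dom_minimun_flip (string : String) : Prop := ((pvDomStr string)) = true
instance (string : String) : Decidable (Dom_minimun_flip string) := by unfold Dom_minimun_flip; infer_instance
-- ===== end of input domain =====

-- B replaces A's per-center slice-and-count scan (quadratic) by one running-count pass; Pre_ excludes
-- the empty string, on which A's `min([])` raises ValueError.


-- ===== PORT A =====
def minimun_flip (string : String) : Int :=
  let arr := (PySem.List.pyRange 0 (PySem.Str.len string) 1).foldl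
    (fun acc center =>
      let lefty := PySem.Str.slice string none (some center)
      let righty := PySem.Str.slice string (some (center + 1)) none
      let lefty_ones : Int := (PySem.Str.count lefty "1" : Int)
      let righty_zeroes : Int := (PySem.Str.count righty "0" : Int)
      acc ++ [lefty_ones + righty_zeroes]) []
  match PySem.List.min? arr (fun x => x) with
  | some m => m
  | none => 0      -- unreachable under Pre_: min([]) raises ValueError in Python

-- ===== PORT B =====
def minimun_flip_altLoop : List Char → Int → Int → Option Int → Option Int
  | [], _, _, best => best
  | ch :: rest, zeros_right, ones_left, best =>
    let zeros_right' := if ch = '0' then zeros_right - 1 else zeros_right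
    let v := ones_left + zeros_right'
    let best' := match best with
      | none => some v
      | some b => if v < b then some v else some b
    minimun_flip_altLoop rest zeros_right' (if ch = '1' then ones_left + 1 else ones_left) best'

def minimun_flip_alt (string : String) : Int :=
  match minimun_flip_altLoop string.toList (PySem.Str.count string "0" : Int) 0 none with
  | some b => b
  | none => 0      -- unreachable under Pre_: Python B returns None only on the empty string

-- ===== PRECONDITION & SPEC =====
-- Pre_ excludes only the empty string: there A's min([]) raises ValueError (and B returns None).
def Pre_minimun_flip (string : String) : Prop := string ≠ ""
instance (string : String) : Decidable (Pre_minimun_flip string) := by unfold Pre_minimun_flip; infer_instance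
def pvWitness_minimun_flip : String := "10"
def Spec_minimun_flip (string : String) (out : Int) : Prop := out = minimun_flip_alt string
instance (string : String) (out : Int) : Decidable (Spec_minimun_flip string out) := by unfold Spec_minimun_flip; infer_instance

-- ===== CLAIM (what is proved, stated in full; the proofs are below) =====
def Claim_equal_minimun_flip : Prop := ∀ (string : String), Dom_minimun_flip string → Pre_minimun_flip string → Spec_minimun_flip string (minimun_flip string)

-- ===== LEMMAS AND PROOFS =====

-- Python's s.count(c) for a single-character pattern is the character count.
theorem go_single (c : Char) : ∀ (l : List Char) (fuel acc : Nat), l.length ≤ fuel →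
    PySem.Chars.count.go [c] fuel l acc = acc + l.count c := by
  intro l
  induction l with
  | nil =>
    intro fuel acc h
    cases fuel <;> simp [PySem.Chars.count.go]
  | cons h t ih =>
    intro fuel acc hf
    cases fuel with
    | zero => simp at hf
    | succ f =>
      simp only [List.length_cons] at hf
      have ht : t.length ≤ f := by omega
      simp only [PySem.Chars.count.go, List.isPrefixOf, Bool.and_true, List.length_cons,
        List.drop_succ_cons, List.count_cons]
      by_cases hc : c = h
      · subst hc
        simp [ih f (acc + 1) ht]
        omega
      · have : (c == h) = false := by simp [hc]
        simp [this, ih f acc ht, Ne.symm hc]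

theorem chars_count_singleton (cs : List Char) (c : Char) :
    PySem.Chars.count cs [c] = cs.count c := by
  simp [PySem.Chars.count, go_single c cs cs.length 0 le_rfl]

-- The list of A's per-center values, with the additive offset a carried left to right.
def pvVals (a : Int) : List Char → List Int
  | [] => []
  | ch :: t => (a + (t.count '0' : Int)) :: pvVals (if ch = '1' then a + 1 else a) t

theorem map_range_eq_pvVals : ∀ (l : List Char) (a : Int),
    (List.range l.length).map
      (fun i => a + ((l.take i).count '1' : Int) + ((l.drop (i + 1)).count '0' : Int))
      = pvVals a l := by
  intro l
  induction l with
  | nil => intro a; simp [pvVals]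
  | cons x t ih =>
    intro a
    simp only [List.length_cons, List.range_succ_eq_map, List.map_cons, List.map_map]
    rw [pvVals]
    congr 1
    · simp
    · rw [← ih (if x = '1' then a + 1 else a)]
      apply List.map_congr_left
      intro i _
      simp only [Function.comp_apply, List.take_succ_cons, List.drop_succ_cons, List.count_cons]
      by_cases hx : x = '1'
      · simp [hx]; ring
      · have h1 : ('1' == x) = false := by simp [Ne.symm hx]
        simp [hx]

-- B's running-minimum accumulator step, as a named function for the proofs.
def pvFoldStep : Option Int → Int → Option Int :=
  fun b? v => match b? with
    | none => some v
    | some b => if v < b then some v else some b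

theorem altLoop_eq_foldOpt : ∀ (t : List Char) (ol : Int) (best : Option Int),
    minimun_flip_altLoop t (t.count '0' : Int) ol best = (pvVals ol t).foldl pvFoldStep best := by
  intro t
  induction t with
  | nil => intro ol best; simp [minimun_flip_altLoop, pvVals]
  | cons ch rest ih =>
    intro ol best
    have hz : (if ch = '0' then ((ch :: rest).count '0' : Int) - 1 else ((ch :: rest).count '0' : Int))
        = (rest.count '0' : Int) := by
      by_cases h : ch = '0'
      · simp [h]
      · simp [h]
    rw [minimun_flip_altLoop.eq_def, pvVals]
    simp only [hz, List.foldl_cons]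
    rw [ih]
    rfl

theorem foldOpt_some : ∀ (vs : List Int) (b : Int),
    vs.foldl pvFoldStep (some b) = some (vs.foldl min b) := by
  intro vs
  induction vs with
  | nil => intro b; rfl
  | cons v vs ih =>
    intro b
    simp only [List.foldl_cons, pvFoldStep]
    have : (if v < b then some v else some b) = some (min b v) := by
      by_cases h : v < b
      · simp [h, min_eq_right (le_of_lt h)]
      · simp [h, min_eq_left (not_lt.mp h)]
    rw [this, ih]

-- ===== VERDICT (by name: the statement is the Claim_ definition above) =====
theorem minimun_flip_spec : Claim_equal_minimun_flip := by
  intro s _ hpre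
  unfold Spec_minimun_flip minimun_flip minimun_flip_alt
  have hl : s.toList ≠ [] := fun h => hpre (String.toList_eq_nil_iff.mp h)
  -- A's arr is the list of per-center values
  have harr : (PySem.List.pyRange 0 (PySem.Str.len s) 1).foldl
      (fun acc center =>
        acc ++ [(PySem.Str.count (PySem.Str.slice s none (some center)) "1" : Int)
               + (PySem.Str.count (PySem.Str.slice s (some (center + 1)) none) "0" : Int)]) []
      = pvVals 0 s.toList := by
    rw [PySem.Str.len_eq, PySem.List.pyRange_zero_natCast,
      PySem.List.foldl_append_singleton_eq_map, List.nil_append, List.map_map,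
      ← map_range_eq_pvVals s.toList 0]
    apply List.map_congr_left
    intro i _
    have h1 : ((i : Int) + 1) = ((i + 1 : Nat) : Int) := by push_cast; ring
    simp only [Function.comp_apply, PySem.Str.count_eq, PySem.Str.toList_slice,
      PySem.Chars.slice_eq_listSlice, PySem.List.slice_to_natCast, h1,
      PySem.List.slice_from_natCast,
      (by decide : ("1" : String).toList = ['1']), (by decide : ("0" : String).toList = ['0']),
      chars_count_singleton]
    ring
  simp only [harr]
  -- B's count and loop
  have hcnt : (PySem.Str.count s "0" : Int) = (s.toList.count '0' : Int) := by
    simp [PySem.Str.count_eq, (by decide : ("0" : String).toList = ['0']), chars_count_singleton]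
  rw [hcnt, altLoop_eq_foldOpt s.toList 0 none]
  -- both sides are the running minimum of pvVals 0 s.toList, which is nonempty
  cases hv : pvVals 0 s.toList with
  | nil =>
    exfalso
    cases hc : s.toList with
    | nil => exact hl hc
    | cons x t => rw [hc, pvVals] at hv; exact List.cons_ne_nil _ _ hv
  | cons v vs =>
    rw [PySem.List.min?_id_cons v vs, List.foldl_cons,
      (by rfl : pvFoldStep none v = some v), foldOpt_some vs v]
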